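-- pv_equiv track=rewrite | github.com/HungryPoitrasths/mybenchmark | scripts/make_scene_debug_viewer.py | build_label_to_object_ids
-- ===== SOURCE A (Python) =====
-- from collections import Counter, defaultdict
-- from typing import Any
--
-- def build_label_to_object_ids(object_ids: list[int], objects_by_id: dict[int, dict[str, Any]]) -> dict[str, list[int]]:
--     buckets: dict[str, list[int]] = defaultdict(list)
--     for obj_id in object_ids:
--         obj = objects_by_id.get(int(obj_id))
--         if obj is None:
--             continue
--         label = str(obj.get("label", "")).strip()
--         if label:
--             buckets[label].append(int(obj_id))
--     return {label: sorted(ids) for label, ids in sorted(buckets.items())}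
-- ===== SOURCE B (Python) =====
-- def build_label_to_object_ids(object_ids: list[int], objects_by_id: dict[int, dict[str, "Any"]]) -> dict[str, list[int]]:
--     # one filtering pass -> flat (label, id) pairs
--     pairs = []
--     for obj_id in object_ids:
--         obj = objects_by_id.get(int(obj_id))
--         if obj is not None:
--             label = str(obj.get("label", "")).strip()
--             if label:
--                 pairs.append((label, int(obj_id)))
--     # one global sort by (label, id), then collapse consecutive equal labels
--     pairs.sort()
--     out: dict[str, list[int]] = {}
--     i = 0
--     n = len(pairs)
--     while i < n:
--         label = pairs[i][0]
--         ids = []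
--         while i < n and pairs[i][0] == label:
--             ids.append(pairs[i][1])
--             i += 1
--         out[label] = ids
--     return out
-- ===== Notes on version B (the rewrite author's own statement) =====
-- stated objective: alternative
-- what changed: A buckets ids into a defaultdict while scanning, then sorts the item list and each bucket separately; B builds a flat (label, id) pair list in one filtering pass, sorts it once globally by the (label, id) tuple, and collapses consecutive equal labels into the result dict.
import Mathlib
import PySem

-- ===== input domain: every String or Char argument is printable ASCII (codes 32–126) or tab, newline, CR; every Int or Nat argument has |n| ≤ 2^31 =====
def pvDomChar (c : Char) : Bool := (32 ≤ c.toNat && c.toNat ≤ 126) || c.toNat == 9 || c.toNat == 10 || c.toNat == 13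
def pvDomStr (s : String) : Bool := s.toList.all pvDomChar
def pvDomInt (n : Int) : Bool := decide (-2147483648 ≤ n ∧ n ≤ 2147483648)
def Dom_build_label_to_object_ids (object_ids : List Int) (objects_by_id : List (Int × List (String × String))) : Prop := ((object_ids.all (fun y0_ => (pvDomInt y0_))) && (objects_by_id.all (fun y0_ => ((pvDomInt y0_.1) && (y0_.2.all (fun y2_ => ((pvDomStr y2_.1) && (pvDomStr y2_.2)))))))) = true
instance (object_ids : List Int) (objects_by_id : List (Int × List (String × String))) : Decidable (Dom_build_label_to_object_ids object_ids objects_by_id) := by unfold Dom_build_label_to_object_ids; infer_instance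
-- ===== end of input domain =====

-- B replaces A's bucket-dict (then per-bucket sorts) with one global sort of flat (label, id)
-- pairs followed by a consecutive-run grouping pass; same results, alternative algorithm.

-- ===== PORT A =====
-- dict parameters are association lists; .get(k) is first-match lookup (shared by both ports)
def pvAssocGet (m : List (Int × List (String × String))) (k : Int) : Option (List (String × String)) :=
  (m.find? (fun p => p.1 == k)).map Prod.snd

-- str(obj.get("label", "")).strip()
def pvLabelOf (obj : List (String × String)) : String :=
  PySem.Str.strip (((obj.find? (fun p => p.1 == "label")).map Prod.snd).getD "")

def build_label_to_object_ids (object_ids : List Int) (objects_by_id : List (Int × List (String × String))) : List (String × List Int) :=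
  let buckets : PySem.Dict String (List Int) :=
    object_ids.foldl (fun d obj_id =>
      match pvAssocGet objects_by_id obj_id with
      | none => d
      | some obj =>
        let label := pvLabelOf obj
        if label = "" then d else d.modify label [] (fun ids => ids ++ [obj_id]))
      PySem.Dict.empty
  (PySem.List.sorted2 buckets.items Prod.fst Prod.snd).map
    (fun p => (p.1, PySem.List.sorted p.2 (fun x => x)))

-- ===== PORT B =====
-- the two nested `while` loops of Source B: collapse consecutive equal labels of the sorted pair list
def pvGroupRuns : List (String × Int) → List (String × List Int)
  | [] => []
  | (l, i) :: rest =>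
    (l, i :: (rest.takeWhile (fun p => p.1 == l)).map Prod.snd)
      :: pvGroupRuns (rest.dropWhile (fun p => p.1 == l))
termination_by xs => xs.length
decreasing_by
  simp only [List.length_cons]
  exact Nat.lt_succ_of_le (List.length_dropWhile_le _ _)

def build_label_to_object_ids_alt (object_ids : List Int) (objects_by_id : List (Int × List (String × String))) : List (String × List Int) :=
  let pairs : List (String × Int) :=
    object_ids.foldl (fun acc obj_id =>
      match pvAssocGet objects_by_id obj_id with
      | none => acc
      | some obj =>
        let label := pvLabelOf obj
        if label = "" then acc else acc ++ [(label, obj_id)])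
      []
  pvGroupRuns (PySem.List.sorted2 pairs Prod.fst Prod.snd)

-- ===== PRECONDITION & SPEC =====
def Spec_build_label_to_object_ids (object_ids : List Int) (objects_by_id : List (Int × List (String × String))) (out : List (String × List Int)) : Prop := out = build_label_to_object_ids_alt object_ids objects_by_id
instance (object_ids : List Int) (objects_by_id : List (Int × List (String × String))) (out : List (String × List Int)) : Decidable (Spec_build_label_to_object_ids object_ids objects_by_id out) := by unfold Spec_build_label_to_object_ids; infer_instance

-- ===== CLAIM (what is proved, stated in full; the proofs are below) =====
def Claim_equal_build_label_to_object_ids : Prop := ∀ (object_ids : List Int) (objects_by_id : List (Int × List (String × String))), Dom_build_label_to_object_ids object_ids objects_by_id → Spec_build_label_to_object_ids object_ids objects_by_id (build_label_to_object_ids object_ids objects_by_id)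

-- ===== LEMMAS AND PROOFS =====

-- the flat filtered (label, id) pair list both loops traverse
def pvEntry (objects_by_id : List (Int × List (String × String))) (oid : Int) : List (String × Int) :=
  match pvAssocGet objects_by_id oid with
  | none => []
  | some obj => if pvLabelOf obj = "" then [] else [(pvLabelOf obj, oid)]

def pvPairs (object_ids : List Int) (objects_by_id : List (Int × List (String × String))) : List (String × Int) :=
  object_ids.flatMap (pvEntry objects_by_id)

lemma pv_pairs_loop (objects_by_id : List (Int × List (String × String))) :
    ∀ (object_ids : List Int) (acc : List (String × Int)),
      object_ids.foldl (fun acc obj_id =>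
        match pvAssocGet objects_by_id obj_id with
        | none => acc
        | some obj =>
          let label := pvLabelOf obj
          if label = "" then acc else acc ++ [(label, obj_id)]) acc
      = acc ++ pvPairs object_ids objects_by_id := by
  intro object_ids
  induction object_ids with
  | nil => intro acc; simp [pvPairs]
  | cons x t ih =>
    intro acc
    simp only [List.foldl_cons, pvPairs, List.flatMap_cons]
    rw [ih]
    cases h : pvAssocGet objects_by_id x with
    | none => simp [pvEntry, pvPairs, h]
    | some obj =>
      by_cases hl : pvLabelOf obj = "" <;> simp [pvEntry, pvPairs, h, hl]

lemma pv_buckets_loop (objects_by_id : List (Int × List (String × String))) :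
    ∀ (object_ids : List Int) (d : PySem.Dict String (List Int)),
      object_ids.foldl (fun d obj_id =>
        match pvAssocGet objects_by_id obj_id with
        | none => d
        | some obj =>
          let label := pvLabelOf obj
          if label = "" then d else d.modify label [] (fun ids => ids ++ [obj_id])) d
      = (pvPairs object_ids objects_by_id).foldl
          (fun d p => d.modify p.1 [] (fun ids => ids ++ [p.2])) d := by
  intro object_ids
  induction object_ids with
  | nil => intro d; simp [pvPairs]
  | cons x t ih =>
    intro d
    simp only [List.foldl_cons, pvPairs, List.flatMap_cons, List.foldl_append]
    cases h : pvAssocGet objects_by_id x with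
    | none => rw [ih]; simp [pvEntry, pvPairs, h]
    | some obj =>
      by_cases hl : pvLabelOf obj = "" <;>
        · simp only [hl, reduceIte]
          rw [ih]
          simp [pvEntry, pvPairs, h, hl]

lemma pv_lt_iff {κ1 κ2 : Type} [LinearOrder κ1] [Preorder κ2] (x1 y1 : κ1) (x2 y2 : κ2) :
    (x1 < y1 ∨ (¬ y1 < x1 ∧ x2 < y2)) ↔ (x1 < y1 ∨ (x1 = y1 ∧ x2 < y2)) := by
  constructor
  · rintro (h | ⟨h1, h2⟩)
    · exact Or.inl h
    · rcases lt_trichotomy x1 y1 with h3|h3|h3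
      · exact Or.inl h3
      · exact Or.inr ⟨h3, h2⟩
      · exact absurd h3 h1
  · rintro (h | ⟨h1, h2⟩)
    · exact Or.inl h
    · exact Or.inr ⟨by rw [h1]; exact lt_irrefl _, h2⟩

lemma pv_sorted2_pairs (xs : List (String × Int)) :
    PySem.List.sorted2 xs Prod.fst Prod.snd
      = PySem.List.sorted xs (fun p => toLex (p.1, p.2)) := by
  simp only [PySem.List.sorted2, PySem.List.sorted, if_neg (by decide : ¬(false = true))]
  congr 1
  funext acc x
  congr 1
  funext a b
  rw [Bool.eq_iff_iff]
  simp only [Bool.or_eq_true, Bool.and_eq_true, Bool.not_eq_true', decide_eq_true_eq,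
    decide_eq_false_iff_not, Prod.Lex.lt_iff, ofLex_toLex]
  exact pv_lt_iff a.1 b.1 a.2 b.2

lemma pv_sorted2_items (xs : List (String × List Int)) :
    PySem.List.sorted2 xs Prod.fst Prod.snd
      = PySem.List.sorted xs (fun p => toLex (p.1, p.2)) := by
  simp only [PySem.List.sorted2, PySem.List.sorted, if_neg (by decide : ¬(false = true))]
  congr 1
  funext acc x
  congr 1
  funext a b
  rw [Bool.eq_iff_iff]
  simp only [Bool.or_eq_true, Bool.and_eq_true, Bool.not_eq_true', decide_eq_true_eq,
    decide_eq_false_iff_not, Prod.Lex.lt_iff, ofLex_toLex]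
  exact pv_lt_iff a.1 b.1 a.2 b.2

lemma pv_ofList_sublist {α : Type} [BEq α] [LawfulBEq α] (xs : List α) :
    (PySem.Set.ofList xs).Sublist xs := by
  induction xs with
  | nil => simp [PySem.Set.ofList_nil]
  | cons x t ih =>
    rw [PySem.Set.ofList_cons]
    exact ((List.filter_sublist).trans ih).cons₂ x

lemma pv_discard_not_mem {α : Type} [BEq α] [LawfulBEq α] (s : List α) (l : α)
    (h : l ∉ s) : PySem.Set.discard s l = s := by
  simp only [PySem.Set.discard]
  rw [List.filter_eq_self]
  intro a ha
  have hne : a ≠ l := fun he => h (he ▸ ha)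
  simp [hne]

-- Set.ofList of a run of l's followed by ys with l ∉ ys

lemma pv_ofList_run {α : Type} [BEq α] [LawfulBEq α] (l : α) :
    ∀ (xs ys : List α), (∀ x ∈ xs, x = l) → l ∉ ys →
      PySem.Set.ofList (l :: (xs ++ ys)) = l :: PySem.Set.ofList ys := by
  intro xs
  induction xs with
  | nil =>
    intro ys _ hy
    rw [List.nil_append, PySem.Set.ofList_cons, pv_discard_not_mem]
    intro hm
    exact hy ((PySem.Set.mem_ofList _ _).mp hm)
  | cons x t ih =>
    intro ys hx hy
    have hxl : x = l := hx x (by simp)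
    subst hxl
    have h1 : PySem.Set.ofList (x :: (x :: t ++ ys)) = PySem.Set.ofList (x :: (t ++ ys)) := by
      simp only [List.cons_append]
      rw [PySem.Set.ofList_cons, PySem.Set.ofList_cons]
      congr 1
      simp only [PySem.Set.discard]
      rw [List.filter_cons_of_neg (by simp), List.filter_filter]
      apply List.filter_congr
      intro a _
      simp
    rw [List.cons_append] at h1 ⊢
    rw [h1]
    exact ih ys (fun a ha => hx a (by simp [ha])) hy

lemma pv_dropWhile_gt (l : String) :
    ∀ (rest : List (String × Int)), rest.Pairwise (fun a b => a.1 ≤ b.1) →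
      (∀ b ∈ rest, l ≤ b.1) →
      ∀ p ∈ rest.dropWhile (fun p => p.1 == l), l < p.1 := by
  intro rest
  induction rest with
  | nil => simp
  | cons r rs ih =>
    intro hpw hle
    rw [List.pairwise_cons] at hpw
    by_cases hr : r.1 = l
    · rw [List.dropWhile_cons_of_pos (by simp [hr])]
      exact ih hpw.2 (fun b hb => hle b (List.mem_cons_of_mem _ hb))
    · rw [List.dropWhile_cons_of_neg (by simp [hr])]
      intro p hp
      rcases List.mem_cons.mp hp with rfl | hp
      · exact lt_of_le_of_ne (hle p (by simp)) (fun he => hr he.symm)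
      · have hrl : l < r.1 := lt_of_le_of_ne (hle r (by simp)) (fun he => hr he.symm)
        exact lt_of_lt_of_le hrl (hpw.1 p hp)

lemma pv_group_spec :
    ∀ (S : List (String × Int)), S.Pairwise (fun a b => a.1 ≤ b.1) →
      pvGroupRuns S
        = (PySem.Set.ofList (S.map Prod.fst)).map
            (fun k => (k, (S.filter (fun p => p.1 == k)).map Prod.snd)) := by
  intro S
  induction S using pvGroupRuns.induct with
  | case1 => intro _; simp [pvGroupRuns, PySem.Set.ofList_nil]
  | case2 l i rest ih =>
    intro h
    rw [List.pairwise_cons] at h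
    obtain ⟨hhead, htail⟩ := h
    have hhead' : ∀ b ∈ rest, l ≤ b.1 := fun b hb => hhead b hb
    have hrest : rest.takeWhile (fun p => p.1 == l) ++ rest.dropWhile (fun p => p.1 == l) = rest :=
      List.takeWhile_append_dropWhile
    have htl : ∀ p ∈ rest.takeWhile (fun p => p.1 == l), p.1 = l := by
      intro p hp
      simpa using List.mem_takeWhile_imp hp
    have hdrgt : ∀ p ∈ rest.dropWhile (fun p => p.1 == l), l < p.1 :=
      pv_dropWhile_gt l rest htail hhead'
    have hdrne : ∀ p ∈ rest.dropWhile (fun p => p.1 == l), p.1 ≠ l :=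
      fun p hp => ne_of_gt (hdrgt p hp)
    have hdpw : (rest.dropWhile (fun p => p.1 == l)).Pairwise (fun a b => a.1 ≤ b.1) :=
      htail.sublist (List.dropWhile_sublist _)
    -- keys
    have hkeys : PySem.Set.ofList (((l, i) :: rest).map Prod.fst)
        = l :: PySem.Set.ofList ((rest.dropWhile (fun p => p.1 == l)).map Prod.fst) := by
      have h2 : ((l, i) :: rest).map Prod.fst
          = l :: ((rest.takeWhile (fun p => p.1 == l)).map Prod.fst
                  ++ (rest.dropWhile (fun p => p.1 == l)).map Prod.fst) := by
        rw [← List.map_append, hrest]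
        simp
      rw [h2]
      apply pv_ofList_run
      · intro x hx
        rcases List.mem_map.mp hx with ⟨p, hp, rfl⟩
        exact htl p hp
      · intro hx
        rcases List.mem_map.mp hx with ⟨p, hp, he⟩
        exact hdrne p hp he
    -- the l-bucket
    have hbl : (((l, i) :: rest).filter (fun p => p.1 == l)).map Prod.snd
        = i :: (rest.takeWhile (fun p => p.1 == l)).map Prod.snd := by
      conv_lhs => rw [← hrest]
      rw [List.filter_cons_of_pos (by simp), List.filter_append]
      rw [List.filter_eq_self.mpr (by intro a ha; simpa using htl a ha)]
      rw [List.filter_eq_nil_iff.mpr (by intro a ha; simpa using hdrne a ha)]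
      simp
    -- other buckets agree with the dropWhile part
    have hbk : ∀ k, k ∈ PySem.Set.ofList ((rest.dropWhile (fun p => p.1 == l)).map Prod.fst) →
        ((l, i) :: rest).filter (fun p => p.1 == k)
          = (rest.dropWhile (fun p => p.1 == l)).filter (fun p => p.1 == k) := by
      intro k hk
      have hkdr : k ∈ (rest.dropWhile (fun p => p.1 == l)).map Prod.fst :=
        (PySem.Set.mem_ofList _ _).mp hk
      rcases List.mem_map.mp hkdr with ⟨p, hp, rfl⟩
      have hlk : l ≠ p.1 := ne_of_lt (hdrgt p hp)
      conv_lhs => rw [← hrest]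
      rw [List.filter_cons_of_neg (by simpa using hlk), List.filter_append]
      rw [List.filter_eq_nil_iff.mpr (by
        intro a ha
        have h3 := htl a ha
        simp only [beq_iff_eq, h3]
        exact hlk)]
      simp
    -- assemble
    rw [pvGroupRuns, hkeys, List.map_cons, ih hdpw]
    congr 1
    · rw [← hbl]
    · apply List.map_congr_left
      intro k hk
      rw [hbk k hk]

-- ===== VERDICT (by name: the statement is the Claim_ definition above) =====
theorem build_label_to_object_ids_spec : Claim_equal_build_label_to_object_ids := by
  intro object_ids objects_by_id _
  unfold Spec_build_label_to_object_ids
  simp only [build_label_to_object_ids, build_label_to_object_ids_alt]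
  rw [pv_buckets_loop, pv_pairs_loop, List.nil_append, pv_sorted2_items, pv_sorted2_pairs]
  set P : List (String × Int) := pvPairs object_ids objects_by_id with hPdef
  set D : PySem.Dict String (List Int) :=
    P.foldl (fun d p => d.modify p.1 [] (fun ids => ids ++ [p.2])) PySem.Dict.empty with hDdef
  -- dict keys
  have hknd : D.keys.Nodup := by
    rw [hDdef]
    exact PySem.Dict.nodup_keys_foldl_modify_key P Prod.fst []
      (fun _ p => (fun ids => ids ++ [p.2])) PySem.Dict.empty (by simp)
  have hkeys : D.keys = PySem.Set.ofList (P.map Prod.fst) := by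
    rw [hDdef]
    rw [PySem.Dict.keys_foldl_modify_key P Prod.fst []
      (fun _ p => (fun ids => ids ++ [p.2])) PySem.Dict.empty]
    simp [PySem.Set.update_nil_left]
  -- dict contents
  have hgetD : ∀ k, D.getD k [] = (P.filter (fun p => p.1 == k)).map (fun x => x.2) := by
    intro k
    rw [hDdef, PySem.Dict.getD_foldl_modify_append]
    simp
  have hitems : D.items = (PySem.Set.ofList (P.map Prod.fst)).map
      (fun k => (k, (P.filter (fun p => p.1 == k)).map (fun x => x.2))) := by
    rw [PySem.Dict.items_eq_map_keys D hknd []]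
    rw [hkeys]
    exact List.map_congr_left (fun k _ => by rw [hgetD k])
  rw [hitems]
  -- names
  set SL : List String := PySem.List.sorted (PySem.Set.ofList (P.map Prod.fst)) (fun x => x) with hSL
  set S : List (String × Int) := PySem.List.sorted P (fun p => toLex (p.1, p.2)) with hS
  -- A's sort of the items: strictly fst-increasing rearrangement
  have hA : PySem.List.sorted ((PySem.Set.ofList (P.map Prod.fst)).map
        (fun k => (k, (P.filter (fun p => p.1 == k)).map (fun x => x.2))))
        (fun p => toLex (p.1, p.2))
      = SL.map (fun k => (k, (P.filter (fun p => p.1 == k)).map (fun x => x.2))) := by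
    apply PySem.List.sorted_eq_of_perm_of_pairwise_lt
    · exact (PySem.List.sorted_perm _ _ _).map _
    · rw [List.pairwise_map]
      apply (PySem.List.sorted_ofList_pairwise_lt (P.map Prod.fst)).imp
      intro a b hab
      rw [Prod.Lex.lt_iff]
      exact Or.inl hab
  rw [hA, List.map_map]
  -- B's sorted pair list: fst-nondecreasing
  have hSpw : S.Pairwise (fun a b => a.1 ≤ b.1) := by
    apply (PySem.List.sorted_pairwise P (fun p => toLex (p.1, p.2))).imp
    intro a b hab
    rcases Prod.Lex.le_iff.mp hab with h | ⟨h, _⟩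
    · exact le_of_lt h
    · exact le_of_eq h
  rw [pv_group_spec S hSpw]
  -- identical key lists
  have hSperm : S.Perm P := PySem.List.sorted_perm _ _ _
  have hofS_lt : (PySem.Set.ofList (S.map Prod.fst)).Pairwise (· < ·) := by
    have hnd : (PySem.Set.ofList (S.map Prod.fst)).Nodup := PySem.Set.nodup_ofList _
    have := List.Pairwise.and ((List.pairwise_map.mpr hSpw).sublist (pv_ofList_sublist _)) hnd
    exact this.imp (fun ⟨hle, hne⟩ => lt_of_le_of_ne hle hne)
  have hSL_lt : SL.Pairwise (· < ·) := PySem.List.sorted_ofList_pairwise_lt (P.map Prod.fst)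
  have hkeq : PySem.Set.ofList (S.map Prod.fst) = SL := by
    have hnd1 : (PySem.Set.ofList (S.map Prod.fst)).Nodup := PySem.Set.nodup_ofList _
    have hnd2 : SL.Nodup :=
      ((PySem.List.sorted_perm _ _ _).nodup_iff).mpr (PySem.Set.nodup_ofList _)
    have hperm : (PySem.Set.ofList (S.map Prod.fst)).Perm SL := by
      rw [List.perm_ext_iff_of_nodup hnd1 hnd2]
      intro a
      rw [PySem.Set.mem_ofList, List.mem_map]
      rw [hSL, PySem.List.mem_sorted, PySem.Set.mem_ofList, List.mem_map]
      constructor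
      · rintro ⟨p, hp, rfl⟩; exact ⟨p, hSperm.mem_iff.mp hp, rfl⟩
      · rintro ⟨p, hp, rfl⟩; exact ⟨p, hSperm.mem_iff.mpr hp, rfl⟩
    exact List.Perm.eq_of_pairwise
      (fun a b _ _ h1 h2 => absurd h2 (lt_asymm h1)) hofS_lt hSL_lt hperm
  rw [hkeq]
  -- per-label buckets agree
  apply List.map_congr_left
  intro k hk
  have hb : PySem.List.sorted ((P.filter (fun p => p.1 == k)).map (fun x => x.2)) (fun x => x)
      = (S.filter (fun p => p.1 == k)).map Prod.snd := by
    apply PySem.List.sorted_id_eq_of_perm_of_pairwise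
    · exact (hSperm.filter _).map _
    · rw [List.pairwise_map]
      have h1 : (S.filter (fun p => p.1 == k)).Pairwise
          (fun a b => toLex (a.1, a.2) ≤ toLex (b.1, b.2)) :=
        (PySem.List.sorted_pairwise P (fun p => toLex (p.1, p.2))).sublist (List.filter_sublist)
      apply h1.imp_of_mem
      intro a b ha hb hab
      have hak : a.1 = k := by simpa using (List.mem_filter.mp ha).2
      have hbk : b.1 = k := by simpa using (List.mem_filter.mp hb).2
      rcases Prod.Lex.le_iff.mp hab with h | ⟨_, h⟩
      · exact absurd (hak.symm ▸ hbk.symm ▸ h) (lt_irrefl _)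
      · exact h
  simp only [Function.comp_apply]
  rw [hb]
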